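-- pv_equiv track=rewrite | github.com/xaviomvi/omvi-pipes-ai | backend/python/code-generator/utils.py | _ensure_unique
-- ===== SOURCE A (Python) =====
-- _ALWAYS_RESERVED_NAMES = {"self", "headers", "body", "body_additional"}
--
-- def _ensure_unique(base: str, used: set, suffix: str) -> str:
--     """
--     Ensure name uniqueness; if taken, apply suffix, then numeric suffixes.
--     Example: 'id' -> 'id_body', then 'id_body2', 'id_body3', ...
--     """
--     name = base
--     if name in used or name in _ALWAYS_RESERVED_NAMES:
--         candidate = f"{base}_{suffix}"
--         i = 2
--         while candidate in used or candidate in _ALWAYS_RESERVED_NAMES: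
--             candidate = f"{base}_{suffix}{i}"
--             i += 1
--         name = candidate
--     used.add(name)
--     return name
-- ===== SOURCE B (Python) =====
-- _ALWAYS_RESERVED_NAMES = {"self", "headers", "body", "body_additional"}
--
--
-- def _ensure_unique(base: str, used: set, suffix: str) -> str:
--     """Instead of probing candidate strings one by one, extract the set of tails
--     already occupying the 'base_suffix*' bucket and pick the smallest missing
--     numeric index arithmetically."""
--     if base not in used and base not in _ALWAYS_RESERVED_NAMES:
--         used.add(base)
--         return base
--     stem = f"{base}_{suffix}"
--     if stem not in used and stem not in _ALWAYS_RESERVED_NAMES: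
--         used.add(stem)
--         return stem
--     tails = {name[len(stem):] for name in used | _ALWAYS_RESERVED_NAMES
--              if name.startswith(stem)}
--     # among len(tails)+1 candidate indices at least one decimal tail is free
--     i = min(k for k in range(2, len(tails) + 3) if str(k) not in tails)
--     name = stem + str(i)
--     used.add(name)
--     return name
-- ===== Notes on version B (the rewrite author's own statement) =====
-- stated objective: alternative
-- what changed: Instead of A's generate-and-probe loop over candidate strings, B makes one pass over used|reserved extracting the string tails of names in the base_suffix bucket into a set, then picks the smallest missing numeric index from a bounded range (pigeonhole) and builds the name once; used is still mutated the same way.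
import Mathlib
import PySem

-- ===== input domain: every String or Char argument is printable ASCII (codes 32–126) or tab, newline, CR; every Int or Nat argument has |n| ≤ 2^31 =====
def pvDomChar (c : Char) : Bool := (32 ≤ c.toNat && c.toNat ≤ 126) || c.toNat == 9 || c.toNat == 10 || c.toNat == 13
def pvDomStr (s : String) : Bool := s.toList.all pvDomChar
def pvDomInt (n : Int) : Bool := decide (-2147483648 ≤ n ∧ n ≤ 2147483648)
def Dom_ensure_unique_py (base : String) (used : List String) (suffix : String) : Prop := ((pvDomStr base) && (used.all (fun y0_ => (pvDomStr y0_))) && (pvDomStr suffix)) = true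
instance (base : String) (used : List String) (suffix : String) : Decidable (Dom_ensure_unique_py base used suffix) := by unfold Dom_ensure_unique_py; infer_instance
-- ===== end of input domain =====

-- B replaces A's probe-each-candidate-string loop by a bucket extraction: collect the
-- string tails of the names starting with base_suffix, then pick the smallest missing
-- numeric index. Equivalence is about the RETURN value — both Pythons also add the
-- returned name to `used` (same mutation). A's unbounded while loop is ported with fuel
-- used.length + 10; the proof shows the loop exits before the fuel does, so the
-- fuel-exhausted default is unreachable.

-- Python set literal _ALWAYS_RESERVED_NAMES; only membership is used.
def pvReserved : List String := ["self", "headers", "body", "body_additional"]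

-- ===== PORT A =====
-- the `while candidate in used or candidate in _ALWAYS_RESERVED_NAMES` loop, fuel-bounded
def pvALoop (base suffix : String) (used : List String) (cand : String) (i : Int) : Nat → String
  | 0 => cand
  | fuel + 1 =>
    if used.contains cand || pvReserved.contains cand then
      pvALoop base suffix used (base ++ "_" ++ suffix ++ PySem.Int.toStr i) (i + 1) fuel
    else cand

def ensure_unique_py (base : String) (used : List String) (suffix : String) : String :=
  if used.contains base || pvReserved.contains base then
    pvALoop base suffix used (base ++ "_" ++ suffix) 2 (used.length + 10)
  else base

-- ===== PORT B =====
-- Source B's set comprehension: the tails of the names that start with stem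
def pvTails (stem : String) (names : List String) : PySem.Set String :=
  names.foldl
    (fun s n =>
      if PySem.Str.startswith n stem then
        PySem.Set.add s (PySem.Str.slice n (some (PySem.Str.len stem)) none)
      else s)
    ([] : PySem.Set String)

def ensure_unique_py_alt (base : String) (used : List String) (suffix : String) : String :=
  if !used.contains base && !pvReserved.contains base then base
  else
    let stem := base ++ "_" ++ suffix
    if !used.contains stem && !pvReserved.contains stem then stem
    else
      let tails := pvTails stem (used ++ pvReserved)
      -- min(k for k in range(2, len(tails)+3) if str(k) not in tails); the getD default
      -- is unreachable (Python's min never sees an empty generator here — proved below)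
      let i := (PySem.List.min? ((PySem.List.pyRange 2 ((tails.length : Int) + 3) 1).filter
            (fun k => !PySem.Set.contains tails (PySem.Int.toStr k))) (fun x => x)).getD 2
      stem ++ PySem.Int.toStr i

-- ===== PRECONDITION & SPEC =====
def Spec_ensure_unique_py (base : String) (used : List String) (suffix : String) (out : String) : Prop := out = ensure_unique_py_alt base used suffix
instance (base : String) (used : List String) (suffix : String) (out : String) : Decidable (Spec_ensure_unique_py base used suffix out) := by unfold Spec_ensure_unique_py; infer_instance

-- ===== CLAIM (what is proved, stated in full; the proofs are below) =====
def Claim_equal_ensure_unique_py : Prop := ∀ (base : String) (used : List String) (suffix : String), Dom_ensure_unique_py base used suffix → Spec_ensure_unique_py base used suffix (ensure_unique_py base used suffix)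

-- ===== LEMMAS AND PROOFS =====

theorem pvDigitChar_toNat (d : Nat) (h : d < 10) : (Nat.digitChar d).toNat = 48 + d := by
  interval_cases d <;> rfl

-- decimal decoding is a left inverse of Nat.toDigits 10 (used only to show str is injective)
theorem pvDec_toDigits (a : Nat) : ∀ n : Nat, (Nat.toDigits 10 n).foldl (fun a c => 10 * a + (c.toNat - 48)) a = a * 10 ^ (Nat.toDigits 10 n).length + n := by
  intro n
  induction n using Nat.strong_induction_on generalizing a with
  | _ n ih =>
    by_cases h : n < 10
    · rw [Nat.toDigits_of_lt_base h]
      simp [List.foldl, pvDigitChar_toNat n h]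
      omega
    · have h10 : (10 : Nat) * (n / 10) + n % 10 = n := Nat.div_add_mod n 10
      have hsplit := Nat.toDigits_append_toDigits (b := 10) (n := n / 10) (d := n % 10) (by norm_num) (by omega) (by omega)
      rw [h10] at hsplit
      rw [← hsplit, List.foldl_append, ih (n / 10) (by omega) a,
        Nat.toDigits_of_lt_base (show n % 10 < 10 by omega)]
      simp [List.foldl, pvDigitChar_toNat _ (show n % 10 < 10 by omega), pow_succ]
      ring_nf
      omega

theorem pvToStr_inj {x y : Int} (hx : 0 ≤ x) (hy : 0 ≤ y)
    (h : PySem.Int.toStr x = PySem.Int.toStr y) : x = y := by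
  have h2 : PySem.Int.toChars x = PySem.Int.toChars y := by
    rw [← PySem.Int.toList_toStr, ← PySem.Int.toList_toStr, h]
  simp only [PySem.Int.toChars, if_neg (by omega : ¬ x < 0), if_neg (by omega : ¬ y < 0)] at h2
  have h3 : x.toNat = y.toNat := by
    have h4 := congrArg (fun cs => cs.foldl (fun a c => 10 * a + (c.toNat - 48)) 0) h2
    simp only [pvDec_toDigits 0] at h4
    simpa using h4
  omega

-- membership in the tails set, relative to any accumulator
theorem pvTails_aux (stem : String) :
    ∀ (names : List String) (s : PySem.Set String) (x : String),
      x ∈ names.foldl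
        (fun s n =>
          if PySem.Str.startswith n stem then
            PySem.Set.add s (PySem.Str.slice n (some (PySem.Str.len stem)) none)
          else s) s ↔
      x ∈ s ∨ ∃ n ∈ names, PySem.Str.startswith n stem = true ∧
        PySem.Str.slice n (some (PySem.Str.len stem)) none = x := by
  intro names
  induction names with
  | nil => simp
  | cons hd tl ih =>
    intro s x
    simp only [List.foldl_cons, ih, List.mem_cons]
    by_cases hs : PySem.Str.startswith hd stem = true
    · rw [if_pos hs]
      constructor
      · rintro (h | h)
        · rcases (PySem.Set.mem_add s _ x).mp h with h | h
          · exact Or.inl h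
          · exact Or.inr ⟨hd, Or.inl rfl, hs, h.symm⟩
        · obtain ⟨n, hn, h1, h2⟩ := h
          exact Or.inr ⟨n, Or.inr hn, h1, h2⟩
      · rintro (h | ⟨n, (rfl | hn), h1, h2⟩)
        · exact Or.inl ((PySem.Set.mem_add s _ x).mpr (Or.inl h))
        · exact Or.inl ((PySem.Set.mem_add s _ x).mpr (Or.inr h2.symm))
        · exact Or.inr ⟨n, hn, h1, h2⟩
    · rw [if_neg hs]
      constructor
      · rintro (h | ⟨n, hn, h1, h2⟩)
        · exact Or.inl h
        · exact Or.inr ⟨n, Or.inr hn, h1, h2⟩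
      · rintro (h | ⟨n, (rfl | hn), h1, h2⟩)
        · exact Or.inl h
        · exact absurd h1 hs
        · exact Or.inr ⟨n, hn, h1, h2⟩

theorem pvTails_mem (stem : String) (names : List String) (x : String) :
    x ∈ pvTails stem names ↔
      ∃ n ∈ names, PySem.Str.startswith n stem = true ∧
        PySem.Str.slice n (some (PySem.Str.len stem)) none = x := by
  rw [pvTails, pvTails_aux]; simp

-- the tails set never outgrows the name list
theorem pvTails_len_aux (stem : String) :
    ∀ (names : List String) (s : PySem.Set String),
      (names.foldl
        (fun s n =>
          if PySem.Str.startswith n stem then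
            PySem.Set.add s (PySem.Str.slice n (some (PySem.Str.len stem)) none)
          else s) s).length ≤ s.length + names.length := by
  intro names
  induction names with
  | nil => simp
  | cons hd tl ih =>
    intro s
    simp only [List.foldl_cons, List.length_cons]
    by_cases hs : PySem.Str.startswith hd stem = true
    · rw [if_pos hs]
      have h1 := ih (PySem.Set.add s (PySem.Str.slice hd (some (PySem.Str.len stem)) none))
      have h2 : (PySem.Set.add s (PySem.Str.slice hd (some (PySem.Str.len stem)) none)).length ≤ s.length + 1 := by
        unfold PySem.Set.add
        split <;> simp
      omega
    · rw [if_neg hs]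
      have := ih s
      omega

theorem pvTails_length_le (stem : String) (names : List String) :
    (pvTails stem names).length ≤ names.length := by
  have := pvTails_len_aux stem names ([] : PySem.Set String)
  simpa [pvTails] using this

-- a name starts with stem and has tail x exactly when it IS stem ++ x
theorem pvBucket_iff (stem n x : String) :
    (PySem.Str.startswith n stem = true ∧
      PySem.Str.slice n (some (PySem.Str.len stem)) none = x) ↔ n = stem ++ x := by
  constructor
  · rintro ⟨h1, h2⟩
    rw [PySem.Str.startswith_eq, PySem.Chars.startswith_iff] at h1
    obtain ⟨r, hr⟩ := h1
    have hx : x.toList = r := by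
      rw [← h2]
      rw [PySem.Str.toList_slice, PySem.Chars.slice_eq_listSlice, PySem.Str.len_eq,
        PySem.List.slice_from_natCast, ← hr, List.drop_left]
    apply String.toList_inj.mp
    rw [String.toList_append, ← hr, hx]
  · rintro rfl
    constructor
    · rw [PySem.Str.startswith_eq, PySem.Chars.startswith_iff, String.toList_append]
      exact List.prefix_append _ _
    · apply String.toList_inj.mp
      rw [PySem.Str.toList_slice, PySem.Chars.slice_eq_listSlice, PySem.Str.len_eq,
        PySem.List.slice_from_natCast, String.toList_append, List.drop_left]

theorem pvTails_mem_iff_append (stem : String) (names : List String) (x : String) :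
    x ∈ pvTails stem names ↔ (stem ++ x) ∈ names := by
  rw [pvTails_mem]
  constructor
  · rintro ⟨n, hn, h⟩
    rwa [(pvBucket_iff stem n x).mp h] at hn
  · intro h
    exact ⟨stem ++ x, h, (pvBucket_iff stem _ x).mpr rfl⟩

-- A's loop reaches stem ++ str(m) when every index in [2, m) is taken and m is free
theorem pvALoop_reaches (base suffix : String) (used : List String) (m : Int)
    (hmono : ∀ j : Int, 2 ≤ j → j < m →
      (used.contains (base ++ "_" ++ suffix ++ PySem.Int.toStr j)
        || pvReserved.contains (base ++ "_" ++ suffix ++ PySem.Int.toStr j)) = true)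
    (hfree : (used.contains (base ++ "_" ++ suffix ++ PySem.Int.toStr m)
        || pvReserved.contains (base ++ "_" ++ suffix ++ PySem.Int.toStr m)) = false) :
    ∀ (F : Nat) (i : Int), 2 ≤ i → i ≤ m → (m - i).toNat < F →
      pvALoop base suffix used (base ++ "_" ++ suffix ++ PySem.Int.toStr i) (i + 1) F =
        base ++ "_" ++ suffix ++ PySem.Int.toStr m := by
  intro F
  induction F with
  | zero => intro i _ _ h; omega
  | succ F ih =>
    intro i h2 him hF
    rcases eq_or_lt_of_le him with rfl | hlt
    · rw [pvALoop, if_neg (by rw [hfree]; exact Bool.false_ne_true)]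
    · rw [pvALoop, if_pos (hmono i h2 hlt)]
      exact ih (i + 1) (by omega) (by omega) (by omega)

-- ===== VERDICT (by name: the statement is the Claim_ definition above) =====
theorem ensure_unique_py_spec : Claim_equal_ensure_unique_py := by
  intro base used suffix _
  unfold Spec_ensure_unique_py
  by_cases cb : (used.contains base || pvReserved.contains base) = true
  case neg =>
    have cb' := Bool.of_not_eq_true cb
    rw [ensure_unique_py, if_neg cb, ensure_unique_py_alt,
      if_pos (by rw [← Bool.not_or, cb']; rfl)]
  case pos =>
    have g1 : (!used.contains base && !pvReserved.contains base) = false := by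
      rw [← Bool.not_or, cb]; rfl
    rw [ensure_unique_py, if_pos cb, ensure_unique_py_alt, if_neg (by rw [g1]; exact Bool.false_ne_true)]
    have hfuel : used.length + 10 = (used.length + 9) + 1 := by omega
    by_cases cs : (used.contains (base ++ "_" ++ suffix) || pvReserved.contains (base ++ "_" ++ suffix)) = true
    case neg =>
      have cs' := Bool.of_not_eq_true cs
      rw [hfuel, pvALoop, if_neg cs]
      rw [if_pos (by rw [← Bool.not_or, cs']; rfl)]
    case pos =>
      rw [if_neg (by rw [← Bool.not_or, cs]; exact Bool.false_ne_true)]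
      set stem := base ++ "_" ++ suffix with hstem
      set T := pvTails stem (used ++ pvReserved) with hT
      set flt := (PySem.List.pyRange 2 ((T.length : Int) + 3) 1).filter
            (fun k => !PySem.Set.contains T (PySem.Int.toStr k)) with hflt
      -- the filtered range is nonempty (pigeonhole: the range has length T + 1 distinct decimals)
      have hne : flt ≠ [] := by
        intro hnil
        have hall : ∀ k ∈ PySem.List.pyRange 2 ((T.length : Int) + 3) 1,
            PySem.Set.contains T (PySem.Int.toStr k) = true := by
          intro k hk
          have := List.filter_eq_nil_iff.mp hnil k hk
          simpa using this
        have hsub : (PySem.List.pyRange 2 ((T.length : Int) + 3) 1).map PySem.Int.toStr ⊆ T := by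
          intro x hx
          obtain ⟨k, hk, rfl⟩ := List.mem_map.mp hx
          exact (PySem.Set.contains_iff T _).mp (hall k hk)
        have hnd : ((PySem.List.pyRange 2 ((T.length : Int) + 3) 1).map PySem.Int.toStr).Nodup := by
          refine (PySem.List.nodup_pyRange_one _ _).map_on ?_
          intro a ha b hb hab
          have h2a := (PySem.List.mem_pyRange_one.mp ha).1
          have h2b := (PySem.List.mem_pyRange_one.mp hb).1
          exact pvToStr_inj (by omega) (by omega) hab
        have hlen : ((PySem.List.pyRange 2 ((T.length : Int) + 3) 1).map PySem.Int.toStr).length = T.length + 1 := by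
          rw [List.length_map, PySem.List.length_pyRange_one]
          omega
        have hle : ((PySem.List.pyRange 2 ((T.length : Int) + 3) 1).map PySem.Int.toStr).length ≤ T.length := by
          calc ((PySem.List.pyRange 2 ((T.length : Int) + 3) 1).map PySem.Int.toStr).length
              = ((PySem.List.pyRange 2 ((T.length : Int) + 3) 1).map PySem.Int.toStr).toFinset.card :=
                (List.toFinset_card_of_nodup hnd).symm
            _ ≤ T.toFinset.card := Finset.card_le_card (by
                intro x hx; rw [List.mem_toFinset] at hx ⊢; exact hsub hx)
            _ ≤ T.length := T.toFinset_card_le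
        omega
      obtain ⟨m, hmin⟩ : ∃ m, PySem.List.min? flt (fun x => x) = some m := by
        cases h : PySem.List.min? flt (fun x => x) with
        | none => exact absurd ((PySem.List.min?_eq_none_iff flt _).mp h) hne
        | some m => exact ⟨m, rfl⟩
      have hmem := PySem.List.min?_mem hmin
      rw [hflt, List.mem_filter] at hmem
      obtain ⟨hmR, hmfree⟩ := hmem
      have hm2 := (PySem.List.mem_pyRange_one.mp hmR).1
      have hmlt := (PySem.List.mem_pyRange_one.mp hmR).2
      have hmfree' : PySem.Set.contains T (PySem.Int.toStr m) = false := by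
        simpa using hmfree
      -- membership in T is membership of the candidate name in used + reserved
      have hcand : ∀ k : Int, (PySem.Set.contains T (PySem.Int.toStr k) = true) ↔
          (stem ++ PySem.Int.toStr k) ∈ used ++ pvReserved := by
        intro k
        rw [PySem.Set.contains_iff, hT, pvTails_mem_iff_append]
      have hfree : (used.contains (stem ++ PySem.Int.toStr m)
          || pvReserved.contains (stem ++ PySem.Int.toStr m)) = false := by
        have : (stem ++ PySem.Int.toStr m) ∉ used ++ pvReserved := by
          intro hmm
          rw [← hcand m] at hmm
          rw [hmfree'] at hmm
          exact Bool.false_ne_true hmm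
        simpa [List.mem_append] using this
      have hmono : ∀ j : Int, 2 ≤ j → j < m →
          (used.contains (stem ++ PySem.Int.toStr j)
            || pvReserved.contains (stem ++ PySem.Int.toStr j)) = true := by
        intro j hj2 hjm
        by_cases hc : PySem.Set.contains T (PySem.Int.toStr j) = true
        · have := (hcand j).mp hc
          simpa [List.mem_append] using this
        · exfalso
          have hjR : j ∈ PySem.List.pyRange 2 ((T.length : Int) + 3) 1 :=
            PySem.List.mem_pyRange_one.mpr ⟨hj2, by omega⟩
          have hjf : j ∈ flt := by
            rw [hflt, List.mem_filter]
            exact ⟨hjR, by rw [Bool.of_not_eq_true hc]; rfl⟩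
          have := PySem.List.min?_isMin hmin j hjf
          omega
      -- A's loop reaches index m before the fuel runs out
      have hLle : T.length ≤ used.length + 4 := by
        have := pvTails_length_le stem (used ++ pvReserved)
        simpa [pvReserved] using this
      rw [hfuel, pvALoop, if_pos cs]
      rw [pvALoop_reaches base suffix used m hmono hfree (used.length + 9) 2 (by omega) (by omega) (by omega)]
      show stem ++ PySem.Int.toStr m =
        stem ++ PySem.Int.toStr ((PySem.List.min? flt (fun x => x)).getD 2)
      rw [hmin, Option.getD_some]
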